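-- pv_equiv track=rewrite | github.com/DmitryChitalov/-algorithms_2021 | Урок 7. Практическое задание/Lesson 7-3.py | without_sort_1
-- ===== SOURCE A (Python) =====
-- def without_sort_1(ex_list):
--     res_list = ex_list
--     left_list = []
--     right_list = []
--     for i in range(len(res_list)):
--         for j in range(len(res_list)):
--             if res_list[i] > res_list[j]:
--                 left_list.append(res_list[j])
--             if res_list[i] < res_list[j]:
--                 right_list.append(res_list[j])
--             if res_list[i] == res_list[j] and i > j:
--                 left_list.append(res_list[j])
--             if res_list[i] == res_list[j] and i < j:
--                 right_list.append(res_list[j])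
--         if len(left_list) == len(right_list):
--             return res_list[i]
--         left_list.clear()
--         right_list.clear()
-- ===== SOURCE B (Python) =====
-- def without_sort_1(ex_list):
--     n = len(ex_list)
--     if n % 2 == 0:
--         return None
--     return sorted(ex_list)[n // 2]
-- ===== Notes on version B (the rewrite author's own statement) =====
-- stated objective: faster
-- what changed: Replaces the quadratic per-element smaller/larger counting scan with a single sort and taking the middle element (returning None for even-length lists, as A does).
import Mathlib
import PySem

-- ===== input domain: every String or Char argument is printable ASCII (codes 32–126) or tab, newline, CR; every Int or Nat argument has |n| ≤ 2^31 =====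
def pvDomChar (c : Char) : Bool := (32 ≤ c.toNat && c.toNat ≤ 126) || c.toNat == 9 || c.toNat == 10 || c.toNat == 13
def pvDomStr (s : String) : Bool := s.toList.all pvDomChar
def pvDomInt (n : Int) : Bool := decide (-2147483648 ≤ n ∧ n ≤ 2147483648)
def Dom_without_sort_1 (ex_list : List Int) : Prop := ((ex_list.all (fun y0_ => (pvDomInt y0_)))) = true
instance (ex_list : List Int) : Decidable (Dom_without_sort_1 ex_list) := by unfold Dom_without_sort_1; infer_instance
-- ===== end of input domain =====

-- B sorts once and takes the middle element instead of A's quadratic per-element smaller/larger counting; both return none for even-length input.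

-- ===== PORT A =====
-- Body of A's inner `for j in range(len(res_list))` loop (the four if-statements, in order).
-- All indices produced by `range(len(res_list))` are in range, so `getD _ 0` is exact for `res_list[i]` / `res_list[j]`.
def stepA (res : List Int) (i : Nat) (p : List Int × List Int) (j : Nat) : List Int × List Int :=
  let ai := res.getD i 0
  let aj := res.getD j 0
  let p1 := if ai > aj then (p.1 ++ [aj], p.2) else p
  let p2 := if ai < aj then (p1.1, p1.2 ++ [aj]) else p1
  let p3 := if ai = aj ∧ i > j then (p2.1 ++ [aj], p2.2) else p2
  let p4 := if ai = aj ∧ i < j then (p3.1, p3.2 ++ [aj]) else p3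
  p4

-- A's inner loop: builds left_list and right_list for a fixed i (they start empty at each i, as `clear()` leaves them).
def innerA (res : List Int) (i : Nat) : List Int × List Int :=
  (List.range res.length).foldl (stepA res i) ([], [])

-- A's outer `for i in range(len(res_list))` loop; Python's early `return` is the Option accumulator.
def without_sort_1 (ex_list : List Int) : Option Int :=
  (List.range ex_list.length).foldl
    (fun acc i =>
      match acc with
      | some r => some r
      | none =>
        let lr := innerA ex_list i
        if lr.1.length = lr.2.length then some (ex_list.getD i 0) else none)
    none

-- ===== PORT B =====
def without_sort_1_alt (ex_list : List Int) : Option Int :=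
  let n := ex_list.length
  if n % 2 = 0 then none
  else (PySem.List.sorted ex_list (fun x => x) false)[n / 2]?   -- n/2 < n here, so Python's sorted(ex_list)[n//2] returns exactly this element

-- ===== PRECONDITION & SPEC =====
def Spec_without_sort_1 (ex_list : List Int) (out : Option Int) : Prop := out = without_sort_1_alt ex_list
instance (ex_list : List Int) (out : Option Int) : Decidable (Spec_without_sort_1 ex_list out) := by unfold Spec_without_sort_1; infer_instance

-- ===== CLAIM (what is proved, stated in full; the proofs are below) =====
def Claim_equal_without_sort_1 : Prop := ∀ (ex_list : List Int), Dom_without_sort_1 ex_list → Spec_without_sort_1 ex_list (without_sort_1 ex_list)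

-- ===== LEMMAS AND PROOFS =====

-- Boolean forms of the conditions under which A appends to left_list resp. right_list at (i, j).
def pL (xs : List Int) (i j : Nat) : Bool := (xs.getD j 0 < xs.getD i 0) || ((xs.getD j 0 == xs.getD i 0) && (j < i))
def pR (xs : List Int) (i j : Nat) : Bool := (xs.getD i 0 < xs.getD j 0) || ((xs.getD j 0 == xs.getD i 0) && (i < j))
-- stable rank of index i: strictly smaller values, plus equal values at earlier indices (and its mirror)
def rkL (xs : List Int) (i : Nat) : Nat := (List.range xs.length).countP (pL xs i)
def rkR (xs : List Int) (i : Nat) : Nat := (List.range xs.length).countP (pR xs i)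

lemma stepA_len (xs : List Int) (i j : Nat) (p : List Int × List Int) :
    (stepA xs i p j).1.length = p.1.length + (if pL xs i j then 1 else 0) ∧
    (stepA xs i p j).2.length = p.2.length + (if pR xs i j then 1 else 0) := by
  simp only [stepA, pL, pR, List.getD_eq_getElem?_getD]
  rcases lt_trichotomy (xs[i]?.getD 0) (xs[j]?.getD 0) with h | h | h
  · simp [h, lt_asymm h, h.ne, h.ne']
  · rcases Nat.lt_trichotomy i j with hij | hij | hij
    · simp [h, hij, Nat.lt_asymm hij]
    · simp [hij]
    · simp [h, hij, Nat.lt_asymm hij]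
  · simp [h, lt_asymm h, h.ne, h.ne']

lemma inner_foldl_len (xs : List Int) (i : Nat) (js : List Nat) (l r : List Int) :
    ((js.foldl (stepA xs i) (l, r)).1.length = l.length + js.countP (pL xs i)) ∧
    ((js.foldl (stepA xs i) (l, r)).2.length = r.length + js.countP (pR xs i)) := by
  induction js generalizing l r with
  | nil => simp
  | cons j t ih =>
    simp only [List.foldl_cons, List.countP_cons]
    obtain ⟨h1, h2⟩ := stepA_len xs i j (l, r)
    rcases hq : stepA xs i (l, r) j with ⟨l', r'⟩
    rw [hq] at h1 h2
    obtain ⟨g1, g2⟩ := ih l' r'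
    rw [g1, g2]
    simp only [] at h1 h2
    constructor <;> omega

lemma innerA_len (xs : List Int) (i : Nat) :
    (innerA xs i).1.length = rkL xs i ∧ (innerA xs i).2.length = rkR xs i := by
  unfold innerA rkL rkR
  simpa using inner_foldl_len xs i (List.range xs.length) [] []

lemma countP_or_disjoint {α : Type} (l : List α) (p q : α → Bool)
    (h : ∀ x ∈ l, ¬(p x = true ∧ q x = true)) :
    l.countP (fun x => p x || q x) = l.countP p + l.countP q := by
  induction l with
  | nil => simp
  | cons x t ih =>
    have ht := ih (fun y hy => h y (by simp [hy]))
    by_cases hp : p x <;> by_cases hq : q x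
    · exact absurd ⟨hp, hq⟩ (h x (by simp))
    all_goals simp [hp, hq, ht]
    all_goals omega

lemma countP_range_getD (xs : List Int) (p : Int → Bool) :
    (List.range xs.length).countP (fun j => p (xs.getD j 0)) = xs.countP p := by
  induction xs with
  | nil => simp
  | cons x t ih =>
    rw [List.length_cons, List.range_succ_eq_map, List.countP_cons]
    rw [List.countP_map]
    simp only [Function.comp_def, List.getD_cons_succ, List.getD_cons_zero]
    rw [ih]
    simp [List.countP_cons]

lemma countP_range_succ_getD (x : Int) (rest : List Int) (k : Nat) (p : Int → Bool) :
    (List.range (k+1)).countP (fun j => p ((x :: rest).getD j 0)) =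
      (if p x then 1 else 0) + (List.range k).countP (fun j => p (rest.getD j 0)) := by
  rw [List.range_succ_eq_map, List.countP_cons]
  simp [List.countP_map, Function.comp_def, Nat.add_comm]

lemma countP_range_lt (n i : Nat) (hin : i ≤ n) (q : Nat → Bool) :
    (List.range n).countP (fun j => q j && decide (j < i)) = (List.range i).countP q := by
  have : n = i + (n - i) := by omega
  rw [this, List.range_add, List.countP_append]
  have h1 : (List.range i).countP (fun j => q j && decide (j < i)) = (List.range i).countP q := by
    apply List.countP_congr
    intro j hj
    simp [List.mem_range.1 hj]
  have h2 : ((List.range (n - i)).map (i + ·)).countP (fun j => q j && decide (j < i)) = 0 := by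
    rw [List.countP_eq_zero]
    intro j hj
    rcases List.mem_map.1 hj with ⟨k, _, rfl⟩
    simp
  omega

lemma countP_range_ne (n i : Nat) (h : i < n) :
    (List.range n).countP (fun j => !(j == i)) = n - 1 := by
  induction n with
  | zero => omega
  | succ n ih =>
    rw [List.range_succ, List.countP_append]
    by_cases hi : i < n
    · rw [ih hi]
      have : ¬(n = i) := by omega
      simp [this]
      omega
    · have hie : i = n := by omega
      subst hie
      have : (List.range i).countP (fun j => !(j == i)) = (List.range i).length := by
        rw [List.countP_eq_length]
        intro j hj
        have := List.mem_range.1 hj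
        simp; omega
      rw [this]
      simp

lemma rkL_eq (xs : List Int) (i : Nat) (hi : i < xs.length) :
    rkL xs i = xs.countP (fun x => x < xs.getD i 0)
      + (List.range i).countP (fun j => xs.getD j 0 == xs.getD i 0) := by
  unfold rkL pL
  rw [countP_or_disjoint]
  · congr 1
    · exact countP_range_getD xs (fun x => x < xs.getD i 0)
    · exact countP_range_lt xs.length i (le_of_lt hi) _
  · intro j _
    simp
    omega

lemma rk_sum (xs : List Int) (i : Nat) (hi : i < xs.length) :
    rkL xs i + rkR xs i = xs.length - 1 := by
  unfold rkL rkR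
  rw [← countP_or_disjoint]
  · have hcongr : (List.range xs.length).countP (fun j => pL xs i j || pR xs i j)
        = (List.range xs.length).countP (fun j => !(j == i)) := by
      apply List.countP_congr
      intro j _
      unfold pL pR
      by_cases hji : j = i
      · subst hji
        simp
      · simp [hji]
        rcases lt_trichotomy (xs[j]?.getD 0) (xs[i]?.getD 0) with h | h | h
        · tauto
        · rw [h]; simp; omega
        · tauto
    rw [hcongr]
    exact countP_range_ne xs.length i hi
  · intro j _
    unfold pL pR
    simp
    omega

lemma countP_le_split (xs : List Int) (v : Int) :
    xs.countP (fun x => x ≤ v) = xs.countP (fun x => x < v) + xs.countP (fun x => x == v) := by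
  rw [← countP_or_disjoint xs _ _ (by intro x _; simp; omega)]
  apply List.countP_congr
  intro x _
  simp only [Bool.or_eq_true, decide_eq_true_eq, beq_iff_eq]
  omega

-- the number of equal values strictly before index i is less than the total number of equal values
lemma occ_before_lt (xs : List Int) (i : Nat) (hi : i < xs.length) :
    (List.range i).countP (fun j => xs.getD j 0 == xs.getD i 0)
      < xs.countP (fun x => x == xs.getD i 0) := by
  rw [← countP_range_getD xs (fun x => x == xs.getD i 0)]
  have hs : xs.length = i + (xs.length - i) := by omega
  rw [hs, List.range_add, List.countP_append]
  have hpos : 0 < ((List.range (xs.length - i)).map (i + ·)).countP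
      (fun j => xs.getD j 0 == xs.getD i 0) := by
    rw [List.countP_pos_iff]
    refine ⟨i, List.mem_map.2 ⟨0, List.mem_range.2 (by omega), by omega⟩, by simp⟩
  omega

-- the bracket satisfied by the element at index i, with k = rkL xs i
lemma rank_bracket (xs : List Int) (i : Nat) (hi : i < xs.length) :
    xs.countP (fun x => x < xs.getD i 0) ≤ rkL xs i ∧
    rkL xs i < xs.countP (fun x => x ≤ xs.getD i 0) := by
  rw [rkL_eq xs i hi, countP_le_split xs (xs.getD i 0)]
  have := occ_before_lt xs i hi
  omega

-- the bracket satisfied by sorted(xs)[k]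
lemma sorted_bracket (xs : List Int) (k : Nat)
    (hk : k < (PySem.List.sorted xs (fun x => x) false).length) :
    xs.countP (fun x => x < (PySem.List.sorted xs (fun x => x) false)[k]) ≤ k ∧
    k < xs.countP (fun x => x ≤ (PySem.List.sorted xs (fun x => x) false)[k]) := by
  set ys := PySem.List.sorted xs (fun x => x) false with hys
  set v := ys[k] with hv
  have hperm : ys.Perm xs := PySem.List.sorted_perm xs (fun x => x) false
  have hpw : ys.Pairwise (· ≤ ·) := PySem.List.sorted_pairwise xs (fun x => x)
  have hget := List.pairwise_iff_getElem.1 hpw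
  constructor
  · rw [← hperm.countP_eq]
    calc ys.countP (fun x => decide (x < v))
        = (ys.take k).countP (fun x => decide (x < v))
          + (ys.drop k).countP (fun x => decide (x < v)) := by
          rw [← List.countP_append, List.take_append_drop]
      _ = (ys.take k).countP (fun x => decide (x < v)) := by
          have : (ys.drop k).countP (fun x => decide (x < v)) = 0 := by
            rw [List.countP_eq_zero]
            intro x hx
            rcases List.mem_iff_getElem.1 hx with ⟨t, ht, rfl⟩
            rw [List.getElem_drop]
            simp only [decide_eq_true_eq, not_lt]
            rcases Nat.eq_zero_or_pos t with rfl | htpos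
            · simp [hv]
            · exact hget k (k + t) hk (by simp at ht; omega) (by omega)
          omega
      _ ≤ (ys.take k).length := List.countP_le_length
      _ ≤ k := by simp
  · rw [← hperm.countP_eq]
    have hlen : (ys.take (k+1)).length = k + 1 := by
      rw [List.length_take]
      omega
    have hall : (ys.take (k+1)).countP (fun x => decide (x ≤ v)) = (ys.take (k+1)).length := by
      rw [List.countP_eq_length]
      intro x hx
      rcases List.mem_iff_getElem.1 hx with ⟨t, ht, rfl⟩
      rw [List.getElem_take]
      simp only [decide_eq_true_eq]
      have ht' : t < k + 1 := by rw [hlen] at ht; exact ht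
      rcases Nat.lt_or_ge t k with htk | htk
      · exact hget t k (by omega) hk htk
      · have : t = k := by omega
        subst this
        simp [hv]
    have hsplit : ys.countP (fun x => decide (x ≤ v))
        = (ys.take (k+1)).countP (fun x => decide (x ≤ v))
          + (ys.drop (k+1)).countP (fun x => decide (x ≤ v)) := by
      rw [← List.countP_append, List.take_append_drop]
    omega

lemma bracket_unique (xs : List Int) (k : Nat) (v w : Int)
    (hv : xs.countP (fun x => x < v) ≤ k ∧ k < xs.countP (fun x => x ≤ v))
    (hw : xs.countP (fun x => x < w) ≤ k ∧ k < xs.countP (fun x => x ≤ w)) : v = w := by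
  rcases lt_trichotomy v w with h | h | h
  · have hm : xs.countP (fun x => x ≤ v) ≤ xs.countP (fun x => x < w) := by
      apply List.countP_mono_left
      intro x _ hx
      simp only [decide_eq_true_eq] at *
      omega
    omega
  · exact h
  · have hm : xs.countP (fun x => x ≤ w) ≤ xs.countP (fun x => x < v) := by
      apply List.countP_mono_left
      intro x _ hx
      simp only [decide_eq_true_eq] at *
      omega
    omega

lemma occ_exists (xs : List Int) (v : Int) (t : Nat) (ht : t < xs.countP (fun x => x == v)) :
    ∃ i, i < xs.length ∧ xs.getD i 0 = v ∧
      (List.range i).countP (fun j => xs.getD j 0 == v) = t := by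
  induction xs generalizing t with
  | nil => simp at ht
  | cons x rest ih =>
    rw [List.countP_cons] at ht
    by_cases hx : x = v
    · rcases t with _ | s
      · exact ⟨0, by simp, by simpa using hx, by simp⟩
      · have hs : s < rest.countP (fun x => x == v) := by
          simp [hx] at ht; omega
        rcases ih s hs with ⟨i', hi', hv', hc'⟩
        refine ⟨i' + 1, by simpa using hi', by simpa using hv', ?_⟩
        rw [countP_range_succ_getD x rest i' (fun y => y == v), hc']
        simp [hx]
        omega
    · have hs : t < rest.countP (fun x => x == v) := by
        simp [hx] at ht; omega
      rcases ih t hs with ⟨i', hi', hv', hc'⟩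
      refine ⟨i' + 1, by simpa using hi', by simpa using hv', ?_⟩
      rw [countP_range_succ_getD x rest i' (fun y => y == v), hc']
      simp [hx]

lemma foldl_opt_some {g : Nat → Option Int} (js : List Nat) (r : Int) :
    js.foldl (fun acc i => match acc with | some r => some r | none => g i) (some r) = some r := by
  induction js with
  | nil => rfl
  | cons j t ih => simpa using ih

lemma foldl_opt_none {g : Nat → Option Int} (js : List Nat)
    (h : ∀ j ∈ js, g j = none) :
    js.foldl (fun acc i => match acc with | some r => some r | none => g i) none = none := by
  induction js with
  | nil => rfl
  | cons j t ih =>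
    simp only [List.foldl_cons]
    rw [h j (by simp)]
    exact ih (fun j hj => h j (by simp [hj]))

lemma foldl_opt_first {g : Nat → Option Int} (js : List Nat) (v : Int)
    (hex : ∃ j ∈ js, g j ≠ none)
    (hall : ∀ j ∈ js, ∀ x, g j = some x → x = v) :
    js.foldl (fun acc i => match acc with | some r => some r | none => g i) none = some v := by
  induction js with
  | nil => simp at hex
  | cons j t ih =>
    simp only [List.foldl_cons]
    cases hg : g j with
    | some x =>
      rw [hall j (by simp) x hg]
      exact foldl_opt_some t v
    | none =>
      rcases hex with ⟨j', hj', hne⟩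
      rcases List.mem_cons.1 hj' with rfl | hmem
      · exact absurd hg hne
      · exact ih ⟨j', hmem, hne⟩ (fun j hj x h => hall j (by simp [hj]) x h)

-- ===== VERDICT (by name: the statement is the Claim_ definition above) =====
theorem without_sort_1_spec : Claim_equal_without_sort_1 := by
  intro xs _
  unfold Spec_without_sort_1
  have hA : without_sort_1 xs = (List.range xs.length).foldl
      (fun acc i => match acc with
        | some r => some r
        | none => (fun i => if (innerA xs i).1.length = (innerA xs i).2.length
            then some (xs.getD i 0) else none) i) none := rfl
  set g : Nat → Option Int := fun i =>
    if (innerA xs i).1.length = (innerA xs i).2.length then some (xs.getD i 0) else none with hg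
  have hcond : ∀ i, i < xs.length →
      ((innerA xs i).1.length = (innerA xs i).2.length ↔ rkL xs i = rkR xs i) := by
    intro i _
    rw [(innerA_len xs i).1, (innerA_len xs i).2]
  by_cases hpar : xs.length % 2 = 0
  · -- even length: A never returns, B returns none
    have hB : without_sort_1_alt xs = none := by
      simp [without_sort_1_alt, hpar]
    rw [hA, hB]
    apply foldl_opt_none
    intro j hj
    have hjn := List.mem_range.1 hj
    simp only [hg]
    rw [if_neg]
    intro hc
    have := (hcond j hjn).1 hc
    have hsum := rk_sum xs j hjn
    omega
  · -- odd length
    set n := xs.length with hn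
    set m := n / 2 with hm
    have hmn : m < n := by omega
    set ys := PySem.List.sorted xs (fun x => x) false with hys
    have hyslen : ys.length = n := by
      rw [hys, PySem.List.length_sorted, hn]
    have hkm : m < ys.length := by omega
    set v := ys[m] with hv
    have hB : without_sort_1_alt xs = some v := by
      simp only [without_sort_1_alt]
      rw [if_neg (by omega)]
      rw [← hys, ← hn, ← hm, List.getElem?_eq_getElem hkm]
    rw [hA, hB]
    have hsb1 : xs.countP (fun x => x < v) ≤ m := (sorted_bracket xs m hkm).1
    have hsb2 : m < xs.countP (fun x => x ≤ v) := (sorted_bracket xs m hkm).2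
    have hval : ∀ i, i < n → rkL xs i = rkR xs i → xs.getD i 0 = v := by
      intro i hi hri
      have hsum := rk_sum xs i hi
      have hrm : rkL xs i = m := by omega
      obtain ⟨hb1, hb2⟩ := rank_bracket xs i hi
      rw [hrm] at hb1 hb2
      exact bracket_unique xs m (xs.getD i 0) v ⟨hb1, hb2⟩ ⟨hsb1, hsb2⟩
    apply foldl_opt_first
    · -- existence of an index whose left/right counts agree
      have hsplit := countP_le_split xs v
      have htlt : m - xs.countP (fun x => x < v) < xs.countP (fun x => x == v) := by omega
      obtain ⟨i, hi, hgv, hcnt⟩ := occ_exists xs v (m - xs.countP (fun x => x < v)) htlt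
      have hrkl : rkL xs i = m := by
        rw [rkL_eq xs i hi, hgv, hcnt]
        omega
      have hsum := rk_sum xs i hi
      refine ⟨i, List.mem_range.2 hi, ?_⟩
      simp only [hg]
      rw [if_pos]
      · simp
      · rw [(hcond i hi).2]
        omega
    · intro j hj x hgj
      have hjn := List.mem_range.1 hj
      simp only [hg] at hgj
      by_cases hc : (innerA xs j).1.length = (innerA xs j).2.length
      · rw [if_pos hc] at hgj
        have h1 := hval j hjn ((hcond j hjn).1 hc)
        injection hgj with h2
        rw [← h2, h1]
      · rw [if_neg hc] at hgj
        exact absurd hgj (by simp)
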